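-- pv_equiv track=rewrite | github.com/tsaiyu0816/MUSIC-HW | HW3/MusDr/task2_rank.py | drop_first_bars
-- ===== SOURCE A (Python) =====
-- BAR_ID = 999_999
--
-- def drop_first_bars(words, n):
--     if n <= 0: return words
--     seen = 0; out = []
--     for w in words:
--         if w == BAR_ID:
--             seen += 1
--             if seen <= n:
--                 continue
--             else :
--                 None
--         if seen > n: out.append(w)
--     return out
-- ===== SOURCE B (Python) =====
-- BAR_ID = 999_999
--
-- def drop_first_bars(words, n):
--     if n <= 0:
--         return words
--     count = 0
--     for i, w in enumerate(words):
--         if w == BAR_ID: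
--             count += 1
--             if count == n + 1:
--                 return words[i:]
--     return []
-- ===== Notes on version B (the rewrite author's own statement) =====
-- stated objective: simpler
-- what changed: B replaces A's per-element conditional accumulation (counter plus append loop) with a locate-then-slice decomposition: scan for the (n+1)th BAR_ID marker and return the tail slice from it in one step, [] if it never appears.
import Mathlib
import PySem

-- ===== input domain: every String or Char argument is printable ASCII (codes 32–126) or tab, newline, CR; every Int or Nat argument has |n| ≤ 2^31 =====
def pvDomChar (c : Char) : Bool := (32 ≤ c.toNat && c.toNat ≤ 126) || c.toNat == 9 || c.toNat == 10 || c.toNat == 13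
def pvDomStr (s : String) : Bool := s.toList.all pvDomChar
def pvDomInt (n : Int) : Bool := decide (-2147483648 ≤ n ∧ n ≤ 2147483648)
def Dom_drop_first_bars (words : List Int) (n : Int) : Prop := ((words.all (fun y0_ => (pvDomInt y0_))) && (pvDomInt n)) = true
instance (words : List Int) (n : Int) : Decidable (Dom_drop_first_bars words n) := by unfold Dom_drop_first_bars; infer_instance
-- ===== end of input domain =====

-- B locates the (n+1)th BAR_ID marker and returns the tail slice from it in one step,
-- instead of A's per-element conditional accumulation (objective: simpler decomposition).

-- ===== PORT A =====
-- loop body of A: state (seen, out)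
def dfbStepA (n : Int) (st : Int × List Int) (w : Int) : Int × List Int :=
  if w = 999999 then
    let seen := st.1 + 1
    if seen ≤ n then (seen, st.2)           -- continue
    else if seen > n then (seen, st.2 ++ [w]) else (seen, st.2)
  else if st.1 > n then (st.1, st.2 ++ [w]) else (st.1, st.2)

def drop_first_bars (words : List Int) (n : Int) : List Int :=
  if n ≤ 0 then words
  else (words.foldl (dfbStepA n) (0, [])).2

-- ===== PORT B =====
-- B's scan: counts markers; at the (n+1)th, returns the remaining tail (= words[i:]) in bulk.
def dfbScanB (n : Int) (count : Int) : List Int → List Int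
  | [] => []
  | w :: ws =>
    if w = 999999 then
      if count + 1 = n + 1 then w :: ws else dfbScanB n (count + 1) ws
    else dfbScanB n count ws

def drop_first_bars_alt (words : List Int) (n : Int) : List Int :=
  if n ≤ 0 then words else dfbScanB n 0 words

-- ===== PRECONDITION & SPEC =====
def Spec_drop_first_bars (words : List Int) (n : Int) (out : List Int) : Prop := out = drop_first_bars_alt words n
instance (words : List Int) (n : Int) (out : List Int) : Decidable (Spec_drop_first_bars words n out) := by unfold Spec_drop_first_bars; infer_instance

-- ===== CLAIM (what is proved, stated in full; the proofs are below) =====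
def Claim_equal_drop_first_bars : Prop := ∀ (words : List Int) (n : Int), Dom_drop_first_bars words n → Spec_drop_first_bars words n (drop_first_bars words n)

-- ===== LEMMAS AND PROOFS =====

-- Once seen > n, A appends every remaining element.
theorem dfb_foldA_hi (n : Int) (ws : List Int) :
    ∀ (seen : Int) (out : List Int), n < seen →
      (ws.foldl (dfbStepA n) (seen, out)).2 = out ++ ws := by
  induction ws with
  | nil => intro seen out _; simp
  | cons w ws ih =>
    intro seen out h
    simp only [List.foldl_cons, dfbStepA]
    by_cases h1 : w = 999999
    · simp only [if_pos h1, if_neg (by omega : ¬ seen + 1 ≤ n),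
        if_pos (by omega : seen + 1 > n)]
      rw [ih (seen + 1) (out ++ [w]) (by omega)]; simp
    · simp only [if_neg h1, if_pos (by omega : seen > n)]
      rw [ih seen (out ++ [w]) h]; simp

-- While seen ≤ n, A's fold (with empty accumulator) equals B's scan with count = seen.
theorem dfb_foldA_lo (n : Int) (ws : List Int) :
    ∀ (seen : Int), seen ≤ n →
      (ws.foldl (dfbStepA n) (seen, [])).2 = dfbScanB n seen ws := by
  induction ws with
  | nil => intro seen _; simp [dfbScanB]
  | cons w ws ih =>
    intro seen h
    simp only [List.foldl_cons, dfbStepA, dfbScanB]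
    by_cases h1 : w = 999999
    · simp only [if_pos h1]
      by_cases h2 : seen + 1 ≤ n
      · simp only [if_pos h2, if_neg (by omega : ¬ seen + 1 = n + 1)]
        exact ih (seen + 1) h2
      · -- marker, seen+1 = n+1: A enters append phase with out = [w]; B returns the tail
        have h3 : seen + 1 = n + 1 := by omega
        simp only [if_neg h2, if_pos (by omega : seen + 1 > n), if_pos h3,
          List.nil_append]
        rw [dfb_foldA_hi n ws (seen + 1) [w] (by omega)]
        simp
    · simp only [if_neg h1, if_neg (by omega : ¬ seen > n)]
      exact ih seen h

-- ===== VERDICT (by name: the statement is the Claim_ definition above) =====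
theorem drop_first_bars_spec : Claim_equal_drop_first_bars := by
  intro words n _
  unfold Spec_drop_first_bars drop_first_bars drop_first_bars_alt
  by_cases h : n ≤ 0
  · simp [h]
  · simp only [if_neg h]
    exact dfb_foldA_lo n words 0 (by omega)
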